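-- pv_equiv track=rewrite | github.com/messagesgoel-blip/slopgate | scripts/benchmark_review.py | normalize_repo_path
-- ===== SOURCE A (Python) =====
-- def normalize_repo_path(raw_path: str, repo_files: list[str]) -> str | None:
--     candidate = raw_path.replace("\\", "/").split("?", 1)[0]
--     if candidate in repo_files:
--         return candidate
--     matches = [path for path in repo_files if candidate.endswith(path)]
--     if not matches:
--         return None
--     return max(matches, key=len)
-- ===== SOURCE B (Python) =====
-- def normalize_repo_path(raw_path: str, repo_files: list[str]) -> str | None:
--     candidate = raw_path.replace("\\", "/").split("?", 1)[0]
--     repo_set = set(repo_files)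
--     n = len(candidate)
--     for length in sorted({len(p) for p in repo_set}, reverse=True):
--         if length <= n:
--             suffix = candidate[n - length:]
--             if suffix in repo_set:
--                 return suffix
--     return None
-- ===== Notes on version B (the rewrite author's own statement) =====
-- stated objective: alternative
-- what changed: Instead of scanning repo_files with endswith to collect every matching path and taking max(...,key=len), B hashes repo_files into a set once and probes only the suffixes of the candidate whose lengths occur in the repo, longest length first, returning the first set hit (which subsumes the exact-match check).
import Mathlib
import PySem

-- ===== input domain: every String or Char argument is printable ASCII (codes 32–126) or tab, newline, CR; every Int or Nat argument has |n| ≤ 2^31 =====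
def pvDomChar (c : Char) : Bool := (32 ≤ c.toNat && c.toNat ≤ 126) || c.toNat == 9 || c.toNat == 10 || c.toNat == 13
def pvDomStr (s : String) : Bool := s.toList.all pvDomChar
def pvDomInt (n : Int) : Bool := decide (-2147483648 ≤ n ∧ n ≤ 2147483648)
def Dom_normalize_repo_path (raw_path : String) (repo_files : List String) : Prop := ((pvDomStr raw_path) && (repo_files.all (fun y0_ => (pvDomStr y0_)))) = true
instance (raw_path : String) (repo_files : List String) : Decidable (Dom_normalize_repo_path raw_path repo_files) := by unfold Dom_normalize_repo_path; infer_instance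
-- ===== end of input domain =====

-- B replaces A's filter-all-suffix-pathMatches + max(key=len) by one repo set built up front and a
-- longest-first probe of the candidate's suffixes, returning the first one present (idiomatic; same cost class).

-- ===== PORT A =====
def normalize_repo_path (raw_path : String) (repo_files : List String) : Option String :=
  -- candidate = raw_path.replace("\\", "/").split("?", 1)[0]; the [0] (pyGet? 0) cannot fail:
  -- split with a non-empty separator always returns at least one piece, so the none branch is unreachable
  match PySem.List.pyGet? ((PySem.Str.splitMax? (PySem.Str.replace raw_path "\\" "/") "?" 1).getD []) 0 with
  | none => none
  | some candidate =>
    if candidate ∈ repo_files then some candidate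
    else
      let pathMatches := repo_files.filter (fun path => PySem.Str.endswith candidate path)
      if pathMatches = [] then none
      else PySem.List.max? pathMatches (fun p => PySem.Str.len p)

-- ===== PORT B =====
def normalize_repo_path_alt (raw_path : String) (repo_files : List String) : Option String :=
  match PySem.List.pyGet? ((PySem.Str.splitMax? (PySem.Str.replace raw_path "\\" "/") "?" 1).getD []) 0 with
  | none => none
  | some candidate =>
    let repo_set : PySem.Set String := PySem.Set.ofList repo_files
    let n := PySem.Str.len candidate
    (PySem.List.sorted (PySem.Set.ofList (repo_set.map (fun p => PySem.Str.len p))) (fun x => x) true).findSome?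
      (fun length =>
        if length ≤ n then
          let suffix := PySem.Str.slice candidate (some (n - length)) none
          if PySem.Set.contains repo_set suffix then some suffix else none
        else none)

-- ===== PRECONDITION & SPEC =====
def Spec_normalize_repo_path (raw_path : String) (repo_files : List String) (out : Option String) : Prop := out = normalize_repo_path_alt raw_path repo_files
instance (raw_path : String) (repo_files : List String) (out : Option String) : Decidable (Spec_normalize_repo_path raw_path repo_files out) := by unfold Spec_normalize_repo_path; infer_instance

-- ===== CLAIM (what is proved, stated in full; the proofs are below) =====
def Claim_equal_normalize_repo_path : Prop := ∀ (raw_path : String) (repo_files : List String), Dom_normalize_repo_path raw_path repo_files → Spec_normalize_repo_path raw_path repo_files (normalize_repo_path raw_path repo_files)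

-- ===== LEMMAS AND PROOFS =====

-- the suffix of `c` starting at character offset i
def pvSuf (c : String) (i : Nat) : String := PySem.Str.slice c (some (i : Int)) none

-- the body of B's loop, for one probed length
def pvF (c : String) (repo : List String) (length : Int) : Option String :=
  if length ≤ PySem.Str.len c then
    let suffix := PySem.Str.slice c (some (PySem.Str.len c - length)) none
    if PySem.Set.contains (PySem.Set.ofList repo) suffix then some suffix else none
  else none

theorem pvSuf_toList (c : String) (i : Nat) : (pvSuf c i).toList = c.toList.drop i := by
  simp [pvSuf, pysem]

theorem pvSuf_zero (c : String) : pvSuf c 0 = c := by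
  apply String.toList_inj.mp; simp [pvSuf_toList]

theorem pvLen_eq (p : String) : PySem.Str.len p = ((p.toList.length : Nat) : Int) := by
  simp [pysem]

theorem pvF_of_gt (c : String) (repo : List String) (L : Int)
    (h : (c.toList.length : Int) < L) : pvF c repo L = none := by
  unfold pvF
  rw [if_neg (by rw [pvLen_eq]; omega)]

theorem pvF_of_le (c : String) (repo : List String) (L : Int) (h0 : 0 ≤ L)
    (hn : L ≤ (c.toList.length : Int)) :
    pvF c repo L = if pvSuf c (c.toList.length - L.toNat) ∈ repo
      then some (pvSuf c (c.toList.length - L.toNat)) else none := by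
  have h2 : PySem.Str.len c - L = ((c.toList.length - L.toNat : Nat) : Int) := by
    rw [pvLen_eq]; omega
  unfold pvF
  rw [h2, if_pos (by rw [pvLen_eq]; exact hn)]
  simp [pvSuf, pysem]

-- a findSome? over a strictly descending list fires at L when everything larger yields none
theorem pvFindDesc {β : Type} (l : List Int) (f : Int → Option β) (L : Int) (b : β)
    (hpair : l.Pairwise (fun a b => b ≤ a)) (hnd : l.Nodup) (hL : L ∈ l)
    (hf : f L = some b) (hnone : ∀ x ∈ l, L < x → f x = none) :
    l.findSome? f = some b := by
  induction l with
  | nil => cases hL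
  | cons a t ih =>
    rcases List.mem_cons.mp hL with rfl | hLt
    · simp [List.findSome?, hf]
    · have hle : L ≤ a := (List.pairwise_cons.mp hpair).1 L hLt
      have hne : a ≠ L := fun h => (List.nodup_cons.mp hnd).1 (h ▸ hLt)
      have ha : f a = none := hnone a List.mem_cons_self (lt_of_le_of_ne hle (Ne.symm hne))
      simp only [List.findSome?, ha]
      exact ih (List.pairwise_cons.mp hpair).2 (List.nodup_cons.mp hnd).2 hLt
        (fun x hx hlt => hnone x (List.mem_cons_of_mem a hx) hlt)

-- the core equivalence, for an arbitrary candidate string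
theorem pvTail_eq (c : String) (repo : List String) :
    (if c ∈ repo then some c
     else if repo.filter (fun path => PySem.Str.endswith c path) = [] then none
     else PySem.List.max? (repo.filter (fun path => PySem.Str.endswith c path)) (fun p => PySem.Str.len p))
    = (PySem.List.sorted (PySem.Set.ofList ((PySem.Set.ofList repo).map (fun p => PySem.Str.len p))) (fun x => x) true).findSome?
        (pvF c repo) := by
  set n := c.toList.length with hn
  set N := PySem.List.sorted (PySem.Set.ofList ((PySem.Set.ofList repo).map (fun p => PySem.Str.len p))) (fun x => x) true with hN
  have hperm := PySem.List.sorted_perm (PySem.Set.ofList ((PySem.Set.ofList repo).map (fun p => PySem.Str.len p))) (fun x => x) true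
  have hmemN : ∀ L, L ∈ N ↔ ∃ p ∈ repo, PySem.Str.len p = L := by
    intro L
    rw [hN, hperm.mem_iff, PySem.Set.mem_ofList, List.mem_map]
    constructor
    · rintro ⟨p, hp, h⟩; exact ⟨p, (PySem.Set.mem_ofList repo p).mp hp, h⟩
    · rintro ⟨p, hp, h⟩; exact ⟨p, (PySem.Set.mem_ofList repo p).mpr hp, h⟩
  have hnodN : N.Nodup := hperm.nodup_iff.mpr (PySem.Set.nodup_ofList _)
  have hpairN : N.Pairwise (fun a b => b ≤ a) := PySem.List.sorted_pairwise_rev _ _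
  -- a repo path is an endswith-match exactly when it is the suffix of c at its own length
  have hmatch : ∀ p ∈ repo, PySem.Str.endswith c p = true →
      p.toList.length ≤ n ∧ pvSuf c (n - p.toList.length) = p := by
    intro p _ hend
    have hsuf : p.toList <:+ c.toList := by
      simpa [pysem, PySem.Chars.endswith_iff] using hend
    refine ⟨hsuf.length_le, ?_⟩
    apply String.toList_inj.mp
    rw [pvSuf_toList]
    exact (List.suffix_iff_eq_drop.mp hsuf).symm
  by_cases hc : c ∈ repo
  · -- exact match: the probe at length n hits c itself, and no larger length is probed
    rw [if_pos hc]
    refine (pvFindDesc N (pvF c repo) (n : Int) c hpairN hnodN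
      ((hmemN _).mpr ⟨c, hc, pvLen_eq c⟩) ?_ ?_).symm
    · rw [pvF_of_le c repo _ (by omega) (by omega)]
      have h0 : n - (((n : Nat) : Int)).toNat = 0 := by omega
      rw [h0, pvSuf_zero, if_pos hc]
    · intro x _ hx
      exact pvF_of_gt c repo x hx
  · by_cases hfil : repo.filter (fun path => PySem.Str.endswith c path) = []
    · -- no match at all: every probe misses
      rw [if_neg hc, if_pos hfil]
      symm
      rw [List.findSome?_eq_none_iff]
      intro L hLN
      obtain ⟨p, hp, rfl⟩ := (hmemN L).mp hLN
      rw [pvLen_eq]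
      by_cases hle : ((p.toList.length : Nat) : Int) ≤ (n : Int)
      · rw [pvF_of_le c repo _ (by omega) hle]
        rw [if_neg]
        intro hmem
        have hend : PySem.Str.endswith c (pvSuf c (n - (((p.toList.length : Nat) : Int)).toNat)) = true := by
          simp only [pysem, PySem.Chars.endswith_iff, pvSuf_toList]
          exact List.drop_suffix _ c.toList
        have : pvSuf c (n - (((p.toList.length : Nat) : Int)).toNat) ∈
            repo.filter (fun path => PySem.Str.endswith c path) :=
          List.mem_filter.mpr ⟨hmem, hend⟩
        rw [hfil] at this
        exact List.not_mem_nil this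
      · exact pvF_of_gt c repo _ (by omega)
    · rw [if_neg hc, if_neg hfil]
      rcases hmax : PySem.List.max? (repo.filter (fun path => PySem.Str.endswith c path))
          (fun p => PySem.Str.len p) with _ | m
      · exact absurd ((PySem.List.max?_eq_none_iff _ _).mp hmax) hfil
      · -- the longest match m is hit first: its length is in the probe list, everything larger misses
        have hmmem := PySem.List.max?_mem hmax
        obtain ⟨hmrepo, hmend⟩ := List.mem_filter.mp hmmem
        obtain ⟨hmle, hmeq⟩ := hmatch m hmrepo hmend
        refine (pvFindDesc N (pvF c repo) (PySem.Str.len m) m hpairN hnodN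
          ((hmemN _).mpr ⟨m, hmrepo, rfl⟩) ?_ ?_).symm
        · rw [pvLen_eq, pvF_of_le c repo _ (by omega) (by omega)]
          have : (((m.toList.length : Nat) : Int)).toNat = m.toList.length := by omega
          rw [this, hmeq, if_pos hmrepo]
        · intro x hxN hx
          obtain ⟨p, hp, rfl⟩ := (hmemN x).mp hxN
          simp only [pvLen_eq] at hx ⊢
          by_cases hle : ((p.toList.length : Nat) : Int) ≤ (n : Int)
          · rw [pvF_of_le c repo _ (by omega) hle]
            rw [if_neg]
            intro hmem
            have hend : PySem.Str.endswith c (pvSuf c (n - (((p.toList.length : Nat) : Int)).toNat)) = true := by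
              simp only [pysem, PySem.Chars.endswith_iff, pvSuf_toList]
              exact List.drop_suffix _ c.toList
            have hinf : pvSuf c (n - (((p.toList.length : Nat) : Int)).toNat) ∈
                repo.filter (fun path => PySem.Str.endswith c path) :=
              List.mem_filter.mpr ⟨hmem, hend⟩
            have hml := PySem.List.max?_isMax hmax _ hinf
            have hlensuf : (pvSuf c (n - (((p.toList.length : Nat) : Int)).toNat)).toList.length
                = p.toList.length := by
              rw [pvSuf_toList, List.length_drop]
              omega
            simp only [pvLen_eq] at hml
            omega
          · exact pvF_of_gt c repo _ (by omega)

-- ===== VERDICT (by name: the statement is the Claim_ definition above) =====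
theorem normalize_repo_path_spec : Claim_equal_normalize_repo_path := by
  intro raw_path repo_files _
  unfold Spec_normalize_repo_path normalize_repo_path normalize_repo_path_alt
  rcases hm : PySem.List.pyGet? ((PySem.Str.splitMax? (PySem.Str.replace raw_path "\\" "/") "?" 1).getD []) 0 with _ | candidate
  · rfl
  · exact pvTail_eq candidate repo_files
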